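-- pv_equiv track=rewrite | github.com/AllanKoder/Competitive-Programming-Training | practice/1300s/glasses.py | solve
-- ===== SOURCE A (Python) =====
-- def solve(arr):
--     n = len(arr)
--     diff = [0]*n
--
--     sum1 = 0
--     sum2 = 0
--
--     visited = set()
--     for i in range(n):
--         if i % 2 == 0:
--             sum1 += arr[i]
--         else:
--             sum2 += arr[i]
--
--         diff = sum1-sum2
--         if diff == 0 or diff in visited:
--             return True
--         visited.add(diff)
-- ===== SOURCE B (Python) =====
-- def solve(arr):
--     p = [0]
--     s = 0
--     for i, x in enumerate(arr):
--         s += x if i % 2 == 0 else -x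
--         p.append(s)
--     p = sorted(p)
--     for a, b in zip(p, p[1:]):
--         if a == b:
--             return True
-- ===== Notes on version B (the rewrite author's own statement) =====
-- stated objective: alternative
-- what changed: B detects a zero/repeated alternating-sign prefix sum without any set: it builds the list of signed prefix sums with a leading 0, sorts it, and scans adjacent pairs for an equal neighbour (sort-then-scan duplicate detection), whereas A grows a hash set online and early-returns on the first collision.
import Mathlib
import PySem

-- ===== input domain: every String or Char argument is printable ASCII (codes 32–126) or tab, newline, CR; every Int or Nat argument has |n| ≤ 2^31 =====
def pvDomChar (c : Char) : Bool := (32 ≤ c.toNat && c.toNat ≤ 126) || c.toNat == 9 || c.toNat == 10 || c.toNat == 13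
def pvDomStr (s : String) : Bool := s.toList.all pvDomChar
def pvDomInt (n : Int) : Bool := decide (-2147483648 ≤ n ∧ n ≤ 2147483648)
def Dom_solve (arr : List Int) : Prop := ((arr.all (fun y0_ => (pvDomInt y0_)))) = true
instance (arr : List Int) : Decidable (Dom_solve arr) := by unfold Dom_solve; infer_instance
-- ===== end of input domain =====

-- B replaces A's online visited-set loop by set-free sort-then-scan duplicate detection
-- on the alternating-sign prefix sums (leading 0); objective: alternative.

-- ===== PORT A =====
-- A's loop over range(n): index i for parity, running sums sum1/sum2, visited set,
-- early return True on diff == 0 or diff already seen; falls off the end -> None.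
def solveLoop : List Int → Nat → Int → Int → PySem.Set Int → Option Bool
  | [], _, _, _, _ => none
  | a :: rest, i, sum1, sum2, visited =>
    let sum1' := if i % 2 == 0 then sum1 + a else sum1
    let sum2' := if i % 2 == 0 then sum2 else sum2 + a
    let diff := sum1' - sum2'
    if diff == 0 || PySem.Set.contains visited diff then some true
    else solveLoop rest (i + 1) sum1' sum2' (PySem.Set.add visited diff)

def solve (arr : List Int) : Option Bool :=
  solveLoop arr 0 0 0 PySem.Set.empty

-- ===== PORT B =====
-- B's first pass: signed prefix sums s += x if i % 2 == 0 else -x, appended in order.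
def altScan : List Int → Nat → Int → List Int
  | [], _, _ => []
  | x :: rest, i, s =>
    let s' := if i % 2 == 0 then s + x else s - x
    s' :: altScan rest (i + 1) s'

-- B's second pass: 'for a, b in zip(p, p[1:]): if a == b: return True'
def adjEqScan : List Int → Option Bool
  | a :: b :: rest => if a == b then some true else adjEqScan (b :: rest)
  | _ => none

def solve_alt (arr : List Int) : Option Bool :=
  adjEqScan (PySem.List.sorted ((0 : Int) :: altScan arr 0 0) (fun x => x) false)

-- ===== PRECONDITION & SPEC =====
def Spec_solve (arr : List Int) (out : Option Bool) : Prop := out = solve_alt arr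
instance (arr : List Int) (out : Option Bool) : Decidable (Spec_solve arr out) := by unfold Spec_solve; infer_instance

-- ===== CLAIM (what is proved, stated in full; the proofs are below) =====
def Claim_equal_solve : Prop := ∀ (arr : List Int), Dom_solve arr → Spec_solve arr (solve arr)

-- ===== LEMMAS AND PROOFS =====

-- the adjacent scan on a ≤-sorted list returns none exactly on strictly increasing lists
theorem adjEqScan_eq_none_iff (l : List Int) (hle : l.Pairwise (· ≤ ·)) :
    adjEqScan l = none ↔ l.Pairwise (· < ·) := by
  induction l with
  | nil => simp [adjEqScan]
  | cons a t ih =>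
    cases t with
    | nil => simp [adjEqScan]
    | cons b rest =>
      rw [List.pairwise_cons] at hle
      obtain ⟨hab, hle'⟩ := hle
      by_cases h : a = b
      · subst h
        simp only [adjEqScan, beq_self_eq_true, if_true]
        constructor
        · intro h; cases h
        · intro h
          rw [List.pairwise_cons] at h
          exact absurd (h.1 a (by simp)) (lt_irrefl a)
      · simp only [adjEqScan, beq_eq_false_iff_ne.mpr h, Bool.false_eq_true, if_false]
        rw [ih hle']
        constructor
        · intro hlt
          rw [List.pairwise_cons]
          refine ⟨?_, hlt⟩
          intro x hx
          have hb : a < b := lt_of_le_of_ne (hab b (by simp)) h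
          rcases List.mem_cons.mp hx with h1 | h1
          · exact h1 ▸ hb
          · rw [List.pairwise_cons] at hlt
            exact lt_trans hb (hlt.1 x h1)
        · intro h
          exact (List.pairwise_cons.mp h).2

-- under Pairwise ≤, strict increase is the same as no duplicates
theorem pairwise_lt_iff_nodup (l : List Int) (hle : l.Pairwise (· ≤ ·)) :
    l.Pairwise (· < ·) ↔ l.Nodup := by
  constructor
  · intro h; exact h.imp (fun h => ne_of_lt h)
  · intro h
    exact (hle.and h).imp (fun ⟨h1, h2⟩ => lt_of_le_of_ne h1 h2)

-- the adjacent scan only ever returns some true when it returns a value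
theorem adjEqScan_some {l : List Int} {b : Bool} (hs : adjEqScan l = some b) : b = true := by
  induction l with
  | nil => simp [adjEqScan] at hs
  | cons a t iht =>
    cases t with
    | nil => simp [adjEqScan] at hs
    | cons c r =>
      by_cases hac : (a == c) = true
      · simp [adjEqScan, hac] at hs; exact hs
      · simp only [adjEqScan, hac, Bool.false_eq_true, if_false] at hs
        exact iht hs

-- one iteration of A's loop, with d abstracting the parity-dependent new difference
theorem solveLoop_step (rest : List Int) (i : Nat) (v : PySem.Set Int) (d : Int)
    (hv : ((0 : Int) :: v).Nodup)
    (IH : ∀ (s1 s2 : Int) (w : PySem.Set Int), ((0 : Int) :: w).Nodup →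
      solveLoop rest (i + 1) s1 s2 w =
        if ((((0 : Int) :: w) ++ altScan rest (i + 1) (s1 - s2)) : List Int).Nodup
        then none else some true)
    (s1' s2' : Int) (hd : s1' - s2' = d) :
    (if (d == 0 || PySem.Set.contains v d) then some true
     else solveLoop rest (i + 1) s1' s2' (PySem.Set.add v d)) =
    (if ((((0 : Int) :: v) ++ d :: altScan rest (i + 1) d) : List Int).Nodup
     then none else some true) := by
  by_cases hmem : d = 0 ∨ d ∈ v
  · have hb : (d == 0 || PySem.Set.contains v d) = true := by
      simp only [Bool.or_eq_true, beq_iff_eq]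
      rcases hmem with h | h
      · exact Or.inl h
      · exact Or.inr ((PySem.Set.contains_iff v d).mpr h)
    rw [hb, if_pos rfl]
    have hnd : ¬ ((((0 : Int) :: v) ++ d :: altScan rest (i + 1) d) : List Int).Nodup := by
      intro hnodup
      have hdl : d ∈ (0 : Int) :: v := by
        rcases hmem with h | h
        · simp [h]
        · exact List.mem_cons_of_mem _ h
      exact (List.nodup_append.mp hnodup).2.2 d hdl d (by simp) rfl
    rw [if_neg hnd]
  · rw [not_or] at hmem
    obtain ⟨h0, hvd⟩ := hmem
    have hb : (d == 0 || PySem.Set.contains v d) = false := by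
      have h1 : (d == 0) = false := beq_eq_false_iff_ne.mpr h0
      have h2 : PySem.Set.contains v d = false := by
        cases h : PySem.Set.contains v d
        · rfl
        · exact absurd ((PySem.Set.contains_iff v d).mp h) hvd
      simp only [h1, Bool.false_or]
      exact h2
    rw [hb]
    simp only [Bool.false_eq_true, if_false]
    rw [PySem.Set.add_of_not_mem hvd]
    have hnodup' : ((0 : Int) :: (v ++ [d])).Nodup := by
      simp only [List.nodup_cons] at hv ⊢
      refine ⟨?_, ?_⟩
      · simp only [List.mem_append, List.mem_singleton]
        rintro (h | h)
        · exact hv.1 h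
        · exact h0 h.symm
      · rw [List.nodup_append]
        refine ⟨hv.2, List.nodup_singleton d, ?_⟩
        intro a ha b hb
        simp only [List.mem_singleton] at hb
        subst hb
        exact fun he => hvd (he ▸ ha)
    rw [IH s1' s2' (v ++ [d]) hnodup', hd]
    have hlist : (((0 : Int) :: (v ++ [d])) ++ altScan rest (i + 1) d : List Int) =
        (((0 : Int) :: v) ++ d :: altScan rest (i + 1) d : List Int) := by
      rw [List.cons_append, List.append_assoc]
      rfl
    rw [hlist]

-- A's loop equals the duplicate test on 0 :: visited-so-far :: future prefix sums
theorem solveLoop_eq (rest : List Int) :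
    ∀ (i : Nat) (s1 s2 : Int) (v : PySem.Set Int), ((0 : Int) :: v).Nodup →
      solveLoop rest i s1 s2 v =
        if ((((0 : Int) :: v) ++ altScan rest i (s1 - s2)) : List Int).Nodup then none
        else some true := by
  induction rest with
  | nil => intro i s1 s2 v hv; simp [solveLoop, altScan, hv]
  | cons a rest ih =>
    intro i s1 s2 v hv
    by_cases hpar : (i % 2 == 0) = true
    · have e : (s1 + a) - s2 = s1 - s2 + a := by ring
      simp only [solveLoop, altScan, hpar, if_true, e]
      exact solveLoop_step rest i v (s1 - s2 + a) hv (fun s1' s2' w hw => ih (i+1) s1' s2' w hw)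
        (s1 + a) s2 e
    · have hpar' : (i % 2 == 0) = false := by simpa using hpar
      have e : s1 - (s2 + a) = s1 - s2 - a := by ring
      simp only [solveLoop, altScan, hpar', Bool.false_eq_true, if_false, e]
      exact solveLoop_step rest i v (s1 - s2 - a) hv (fun s1' s2' w hw => ih (i+1) s1' s2' w hw)
        s1 (s2 + a) e

-- ===== VERDICT (by name: the statement is the Claim_ definition above) =====
theorem solve_spec : Claim_equal_solve := by
  intro arr _
  unfold Spec_solve solve solve_alt
  have h := solveLoop_eq arr 0 0 0 PySem.Set.empty (by simp [PySem.Set.empty])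
  rw [h]
  simp only [PySem.Set.empty, List.cons_append, List.nil_append, sub_self]
  set p := (0 : Int) :: altScan arr 0 0 with hp
  have hle : (PySem.List.sorted p (fun x => x) false).Pairwise (· ≤ ·) :=
    PySem.List.sorted_pairwise p (fun x => x)
  have hperm : (PySem.List.sorted p (fun x => x) false).Perm p :=
    PySem.List.sorted_perm p (fun x => x) false
  by_cases hn : p.Nodup
  · rw [if_pos hn]
    symm
    rw [adjEqScan_eq_none_iff _ hle, pairwise_lt_iff_nodup _ hle]
    exact hperm.nodup_iff.mpr hn
  · rw [if_neg hn]
    have hne : adjEqScan (PySem.List.sorted p (fun x => x) false) ≠ none := by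
      intro h
      rw [adjEqScan_eq_none_iff _ hle, pairwise_lt_iff_nodup _ hle] at h
      exact hn (hperm.nodup_iff.mp h)
    cases hs : adjEqScan (PySem.List.sorted p (fun x => x) false) with
    | none => exact absurd hs hne
    | some b => rw [adjEqScan_some hs]
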